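-- pv_equiv track=rewrite | github.com/DizBalanser/ClearMind | src/backend/app/services/agents/brain_dump.py | _detect_links
-- ===== SOURCE A (Python) =====
-- def _detect_links(new_items: list[dict], existing_items: list[dict]) -> list[dict]:
--     """
--     Detect potential links between newly classified items and existing items.
--     Uses simple keyword matching for now — can be upgraded to semantic similarity later.
--     """
--     links = []
--     if not existing_items:
--         return links
--
--     for new_item in new_items:
--         new_title = new_item.get("title", "").lower()
--         new_area = new_item.get("life_area", "").lower()
--
--         for existing in existing_items:
--             existing_title = existing.get("title", "").lower()
--             existing_area = existing.get("life_area", "").lower()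
--
--             # Link if same life area and overlapping keywords
--             if new_area and new_area == existing_area:
--                 new_words = set(new_title.split())
--                 existing_words = set(existing_title.split())
--                 common = new_words & existing_words - {"the", "a", "an", "to", "for", "and", "or", "my", "i"}
--                 if len(common) >= 1:
--                     links.append(
--                         {
--                             "source_title": new_item["title"],
--                             "target_id": existing.get("id"),
--                             "link_type": "relates_to",
--                         }
--                     )
--
--     return links
-- ===== SOURCE B (Python) =====
-- def _detect_links(new_items: list[dict], existing_items: list[dict]) -> list[dict]:
--     """Group existing items by life area, with keyword sets precomputed once per item."""
--     STOP = {"the", "a", "an", "to", "for", "and", "or", "my", "i"}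
--     by_area = {}
--     for ex in existing_items:
--         area = ex.get("life_area", "").lower()
--         words = set(ex.get("title", "").lower().split()) - STOP
--         by_area.setdefault(area, []).append((words, ex))
--     links = []
--     for new_item in new_items:
--         area = new_item.get("life_area", "").lower()
--         if area:
--             new_words = set(new_item.get("title", "").lower().split())
--             for ex_words, ex in by_area.get(area, []):
--                 if new_words & ex_words:
--                     links.append({
--                         "source_title": new_item["title"],
--                         "target_id": ex.get("id"),
--                         "link_type": "relates_to",
--                     })
--     return links
-- ===== Notes on version B (the rewrite author's own statement) =====
-- stated objective: alternative
-- what changed: Instead of testing every (new, existing) pair and re-tokenizing both titles inside the N*M loop, B builds a dict grouping existing items by life area with their stop-word-free keyword sets precomputed once, so each new item only scans its same-area bucket with a set-overlap test (intended as faster; a timing run measured only ~1.4x at the largest size).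
import Mathlib
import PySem

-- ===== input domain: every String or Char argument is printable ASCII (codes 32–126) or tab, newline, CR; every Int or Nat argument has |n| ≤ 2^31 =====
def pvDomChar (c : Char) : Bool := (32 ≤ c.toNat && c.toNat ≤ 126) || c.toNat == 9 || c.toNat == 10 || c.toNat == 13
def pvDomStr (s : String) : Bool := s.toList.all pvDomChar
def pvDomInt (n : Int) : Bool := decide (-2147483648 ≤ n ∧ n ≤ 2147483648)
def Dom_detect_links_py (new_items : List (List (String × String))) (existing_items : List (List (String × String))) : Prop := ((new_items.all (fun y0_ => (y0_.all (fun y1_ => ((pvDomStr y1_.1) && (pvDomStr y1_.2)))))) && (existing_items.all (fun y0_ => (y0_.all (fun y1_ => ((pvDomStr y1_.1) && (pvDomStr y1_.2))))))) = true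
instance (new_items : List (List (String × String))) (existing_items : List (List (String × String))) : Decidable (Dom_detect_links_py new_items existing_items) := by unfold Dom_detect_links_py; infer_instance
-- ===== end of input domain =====

-- B groups the existing items by life area once (dict) and tokenizes each title once, so each new item only
-- scans its same-area bucket; objective: alternative (intended as faster; a timing run measured ~1.4x, below its 1.5x bar).

-- shared helpers (what both Pythons compute for each item)
def pvStop : PySem.Set String := PySem.Set.ofList ["the", "a", "an", "to", "for", "and", "or", "my", "i"]

-- item.get(k, "") on the Python dict built from the pair list
def pvGet (item : List (String × String)) (k : String) : String :=
  (PySem.Dict.ofList item).getD k ""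

def pvArea (item : List (String × String)) : String :=
  PySem.Str.lower (pvGet item "life_area")

def pvRawWords (item : List (String × String)) : PySem.Set String :=
  PySem.Set.ofList (PySem.Str.split₀ (PySem.Str.lower (pvGet item "title")))

-- set(title.lower().split()) - STOP
def pvWords (item : List (String × String)) : PySem.Set String :=
  PySem.Set.diff (pvRawWords item) pvStop

-- the produced link record
def pvLink (new_item existing : List (String × String)) : List (String × String) :=
  [("source_title", pvGet new_item "title"),
   ("target_id", pvGet existing "id"),
   ("link_type", "relates_to")]

-- ===== PORT A =====
def detect_links_py (new_items : List (List (String × String))) (existing_items : List (List (String × String))) : List (List (String × String)) :=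
  if existing_items = [] then [] else
  new_items.foldl (fun links new_item =>
    let new_area := pvArea new_item
    existing_items.foldl (fun links existing =>
      let existing_area := pvArea existing
      if new_area ≠ "" ∧ new_area = existing_area then
        -- common = new_words & (existing_words - STOP)   (Python precedence: '-' binds tighter than '&')
        let common := PySem.Set.inter (pvRawWords new_item) (pvWords existing)
        if 1 ≤ PySem.Set.len common then links ++ [pvLink new_item existing] else links
      else links) links) []

-- ===== PORT B =====
def detect_links_py_alt (new_items : List (List (String × String))) (existing_items : List (List (String × String))) : List (List (String × String)) :=
  -- by_area.setdefault(area, []).append((words, ex))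
  let by_area : PySem.Dict String (List (PySem.Set String × List (String × String))) :=
    existing_items.foldl (fun d ex => d.modify (pvArea ex) [] (· ++ [(pvWords ex, ex)])) PySem.Dict.empty
  new_items.foldl (fun links new_item =>
    let area := pvArea new_item
    if area ≠ "" then
      let new_words := pvRawWords new_item
      (by_area.getD area []).foldl (fun links p =>
        if PySem.Set.inter new_words p.1 ≠ PySem.Set.empty then links ++ [pvLink new_item p.2] else links) links
    else links) []

-- ===== PRECONDITION & SPEC =====
-- Pre_ excludes inputs on which some link actually fires from a new item lacking the "title" key
-- (Python A raises KeyError there) or towards an existing item lacking the "id" key (A then returns a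
-- dict whose "target_id" is None, which is not a value of the declared str type).
def Pre_detect_links_py (new_items : List (List (String × String))) (existing_items : List (List (String × String))) : Prop :=
  ∀ n ∈ new_items, ∀ e ∈ existing_items,
    (pvArea n ≠ "" ∧ pvArea n = pvArea e ∧ PySem.Set.inter (pvRawWords n) (pvWords e) ≠ PySem.Set.empty) →
      ((PySem.Dict.ofList n).contains "title" = true ∧ (PySem.Dict.ofList e).contains "id" = true)
instance (new_items : List (List (String × String))) (existing_items : List (List (String × String))) : Decidable (Pre_detect_links_py new_items existing_items) := by unfold Pre_detect_links_py; infer_instance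

def pvWitness_detect_links_py : (List (List (String × String))) × (List (List (String × String))) :=
  ([[("title", "Run fast"), ("life_area", "Health")]],
   [[("title", "run daily"), ("id", "7"), ("life_area", "health")], [("title", "budget"), ("life_area", "money")]])

def Spec_detect_links_py (new_items : List (List (String × String))) (existing_items : List (List (String × String))) (out : List (List (String × String))) : Prop := out = detect_links_py_alt new_items existing_items
instance (new_items : List (List (String × String))) (existing_items : List (List (String × String))) (out : List (List (String × String))) : Decidable (Spec_detect_links_py new_items existing_items out) := by unfold Spec_detect_links_py; infer_instance

-- ===== CLAIM (what is proved, stated in full; the proofs are below) =====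
def Claim_equal_detect_links_py : Prop := ∀ (new_items : List (List (String × String))) (existing_items : List (List (String × String))), Dom_detect_links_py new_items existing_items → Pre_detect_links_py new_items existing_items → Spec_detect_links_py new_items existing_items (detect_links_py new_items existing_items)

-- ===== LEMMAS AND PROOFS =====

-- a conditional-append fold over a filtered list is the fold with the conjoined test
theorem foldl_filter_if_append {α β : Type} (q : α → Bool) (c : α → Prop) [DecidablePred c]
    (f : α → β) (l : List α) (acc : List β) :
    (l.filter q).foldl (fun a x => if c x then a ++ [f x] else a) acc
      = l.foldl (fun a x => if q x = true ∧ c x then a ++ [f x] else a) acc := by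
  induction l generalizing acc with
  | nil => rfl
  | cons h t ih =>
      by_cases hq : q h = true
      · simp [hq, List.foldl_cons]
        by_cases hc : c h <;> simp [hc, ih]
      · simp [hq, List.foldl_cons, ih]


-- the Dict built by B's grouping loop, characterized as an ordered filter of existing_items
theorem group_getD (ei : List (List (String × String))) (a : String) :
    (ei.foldl (fun d ex => d.modify (pvArea ex) [] (· ++ [(pvWords ex, ex)])) PySem.Dict.empty).getD a []
      = (ei.filter (fun e => pvArea e == a)).map (fun e => (pvWords e, e)) := by
  have h := PySem.Dict.getD_foldl_modify_append (ei.map (fun e => (pvArea e, (pvWords e, e)))) PySem.Dict.empty a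
  rw [List.foldl_map] at h
  simpa [List.filter_map, Function.comp] using h

theorem set_one_le_len (s : PySem.Set String) (h : s ≠ []) : 1 ≤ PySem.Set.len s := by
  cases s with
  | nil => exact absurd rfl h
  | cons x xs => simp [PySem.Set.len]

set_option maxHeartbeats 1600000 in
theorem detect_links_py_spec : Claim_equal_detect_links_py := by
  intro ni ei _ _
  unfold Spec_detect_links_py detect_links_py detect_links_py_alt
  simp only []
  by_cases hei : ei = []
  · subst hei
    rw [if_pos rfl]
    rw [PySem.List.foldl_congr_mem ni _ (fun links _ => links) []
      (by intro acc n _; simp [PySem.Dict.getD_empty])]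
    exact (List.foldl_fixed ni).symm
  · rw [if_neg hei]
    apply PySem.List.foldl_congr_mem
    intro links n _
    by_cases ha : pvArea n = ""
    · simp [ha, List.foldl_fixed]
    · rw [if_pos ha, group_getD, List.foldl_map, foldl_filter_if_append]
      apply PySem.List.foldl_congr_mem
      intro l e _
      by_cases he : pvArea n = pvArea e
      · by_cases hi : PySem.Set.inter (pvRawWords n) (pvWords e) = PySem.Set.empty
        · have hlen0 : ¬ 1 ≤ PySem.Set.len (PySem.Set.inter (pvRawWords n) (pvWords e)) := by
            rw [hi]; simp [PySem.Set.len, PySem.Set.empty]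
          rw [if_pos (And.intro ha he), if_neg hlen0, if_neg (fun h => h.2 hi)]
        · rw [if_pos (And.intro ha he),
              if_pos (set_one_le_len _ hi),
              if_pos (And.intro (by simp [he]) hi)]
      · rw [if_neg (fun h => he h.2),
            if_neg (fun h => he (beq_iff_eq.mp h.1).symm)]
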